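-- pv_equiv track=rewrite | github.com/gladklo/bachelorThesis | Skripts/extract_tables.py | find_all_sections
-- ===== SOURCE A (Python) =====
-- from typing import List, Tuple, Optional
--
-- def normalize_heading_name(line: str) -> str:
--     # Entfernt führende/folgende Spaces und Sternchen, lowercased
--     return line.strip().strip('*').strip().lower()
--
-- def is_setext_underline(line: str) -> bool:
--     s = line.strip()
--     return len(s) > 0 and set(s) == {'='}
--
-- def find_setext_section(lines: List[str], target_name: str) -> Optional[Tuple[int, int]]:
--     """
--     Findet eine Setext-Section:
--         **Name**
--         ========
--         (Inhalt...)
--     und gibt (start_index, end_index_excl) zurück,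
--     wobei start_index auf der Namens-Zeile liegt und end_index_excl
--     die erste Zeile der *nächsten* Setext-Section (oder len(lines)) ist.
--     """
--     # alle Kandidaten im Text finden (erste passende nehmen)
--     starts = []
--     for i in range(len(lines) - 1):
--         if normalize_heading_name(lines[i]) == target_name and is_setext_underline(lines[i + 1]):
--             starts.append(i)
--     if not starts:
--         return None
--
--     start = starts[0]
--     # Ende: nächste Setext-Überschrift (beliebiger Name)
--     j = start + 2
--     while j < len(lines) - 1:
--         if is_setext_underline(lines[j + 1]):
--             # j ist Zeile mit neuem Namen, j+1 ist =====
--             break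
--         j += 1
--     end = j if j < len(lines) - 1 else len(lines)
--     return (start, end)
--
-- def find_all_sections(lines: List[str], target_names: List[str]) -> List[Tuple[int, int]]:
--     """
--     Sucht alle gewünschten Setext-Sections (z.B. ["overview", "tables"]) und
--     gibt sie als nicht überlappende Spans in der Reihenfolge ihres Auftretens zurück.
--     """
--     spans = []
--     for name in target_names:
--         sec = find_setext_section(lines, name)
--         if sec:
--             spans.append(sec)
--     spans.sort(key=lambda t: t[0])
--
--     # Überlappungen (sollten nicht auftreten) sicher ausschließen
--     cleaned = []
--     last_end = -1
--     for s, e in spans: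
--         if s >= last_end:
--             cleaned.append((s, e))
--             last_end = e
--     return cleaned
-- ===== SOURCE B (Python) =====
-- from typing import List, Tuple
--
--
-- def normalize_heading_name(line: str) -> str:
--     return line.strip().strip('*').strip().lower()
--
--
-- def is_setext_underline(line: str) -> bool:
--     s = line.strip()
--     return len(s) > 0 and set(s) == {'='}
--
--
-- def find_all_sections(lines: List[str], target_names: List[str]) -> List[Tuple[int, int]]:
--     # One pass over the file: every heading position (line followed by an
--     # all-'=' underline) is collected once; a first-wins dict maps each
--     # normalized heading name to its first position.
--     n = len(lines)
--     heads = [i for i in range(n - 1) if is_setext_underline(lines[i + 1])]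
--     firsts = {}
--     for i in heads:
--         firsts.setdefault(normalize_heading_name(lines[i]), i)
--     spans = []
--     for name in target_names:
--         start = firsts.get(name)
--         if start is None:
--             continue
--         end = next((h for h in heads if h >= start + 2), n)
--         spans.append((start, end))
--     spans.sort(key=lambda t: t[0])
--     cleaned = []
--     last_end = -1
--     for s, e in spans:
--         if s >= last_end:
--             cleaned.append((s, e))
--             last_end = e
--     return cleaned
-- ===== Notes on version B (the rewrite author's own statement) =====
-- stated objective: faster
-- what changed: B scans the file once to collect all setext-heading positions and a first-wins dict from normalized name to position, then answers each target name from those precomputed structures, instead of A's full rescan of all lines (with repeated normalization and underline tests) for every target name.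
import Mathlib
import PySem

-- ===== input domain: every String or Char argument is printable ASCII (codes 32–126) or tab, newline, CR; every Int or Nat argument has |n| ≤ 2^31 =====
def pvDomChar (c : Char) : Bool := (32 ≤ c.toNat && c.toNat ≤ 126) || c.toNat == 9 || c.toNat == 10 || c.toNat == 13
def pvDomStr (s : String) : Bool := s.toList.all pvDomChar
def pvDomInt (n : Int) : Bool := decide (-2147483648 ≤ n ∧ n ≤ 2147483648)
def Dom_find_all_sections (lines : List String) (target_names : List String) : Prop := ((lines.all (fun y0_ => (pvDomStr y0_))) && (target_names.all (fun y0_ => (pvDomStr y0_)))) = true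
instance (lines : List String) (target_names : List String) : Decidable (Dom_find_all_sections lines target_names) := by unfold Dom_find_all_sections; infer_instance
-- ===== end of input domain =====

-- B precomputes all setext heading positions in ONE pass and a first-wins dict from
-- normalized name to position, instead of A's full rescan of all lines per target name.

-- ===== PORT A =====
-- shared module helpers (both Pythons use the same two module-level helpers)
def normalize_heading_name (line : String) : String :=
  PySem.Str.lower (PySem.Str.strip (PySem.Str.stripChars (PySem.Str.strip line) "*"))

def is_setext_underline (line : String) : Bool :=
  let s := PySem.Str.strip line
  decide (0 < PySem.Str.len s) && PySem.Set.equal (PySem.Set.ofList s.toList) (PySem.Set.ofList ['='])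

-- the 'while j < len(lines) - 1: if is_setext_underline(lines[j+1]): break; j += 1' loop; returns the final j
def fss_while (lines : List String) (j : Int) : Int :=
  if _h : j < (lines.length : Int) - 1 then
    if is_setext_underline (PySem.List.pyGetD lines (j + 1) "") then j
    else fss_while lines (j + 1)
  else j
termination_by ((lines.length : Int) - 1 - j).toNat
decreasing_by omega

def find_setext_section (lines : List String) (target_name : String) : Option (Int × Int) :=
  let starts := (PySem.List.pyRange 0 ((lines.length : Int) - 1) 1).foldl
    (fun acc i =>
      if normalize_heading_name (PySem.List.pyGetD lines i "") == target_name
          && is_setext_underline (PySem.List.pyGetD lines (i + 1) "") then acc ++ [i] else acc) []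
  match starts with
  | [] => none
  | start :: _ =>
    let j := fss_while lines (start + 2)
    some (start, if j < (lines.length : Int) - 1 then j else (lines.length : Int))

def find_all_sections (lines : List String) (target_names : List String) : List (Int × Int) :=
  let spans := target_names.foldl
    (fun acc name =>
      match find_setext_section lines name with
      | some sec => acc ++ [sec]
      | none => acc) []
  let spans := PySem.List.sorted spans (fun t => t.1) false
  (spans.foldl
    (fun (st : List (Int × Int) × Int) p =>
      if st.2 ≤ p.1 then (st.1 ++ [p], p.2) else st) ([], -1)).1

-- ===== PORT B =====
def find_all_sections_alt (lines : List String) (target_names : List String) : List (Int × Int) :=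
  let n : Int := lines.length
  let heads := (PySem.List.pyRange 0 (n - 1) 1).filter
    (fun i => is_setext_underline (PySem.List.pyGetD lines (i + 1) ""))
  let firsts : PySem.Dict String Int := heads.foldl
    (fun d i => d.setdefault (normalize_heading_name (PySem.List.pyGetD lines i "")) i) PySem.Dict.empty
  let spans := target_names.foldl
    (fun acc name =>
      match firsts.get? name with
      | some start => acc ++ [(start, (heads.find? (fun h => start + 2 ≤ h)).getD n)]
      | none => acc) []
  let spans := PySem.List.sorted spans (fun t => t.1) false
  (spans.foldl
    (fun (st : List (Int × Int) × Int) p =>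
      if st.2 ≤ p.1 then (st.1 ++ [p], p.2) else st) ([], -1)).1

-- ===== PRECONDITION & SPEC =====
def Spec_find_all_sections (lines : List String) (target_names : List String) (out : List (Int × Int)) : Prop := out = find_all_sections_alt lines target_names
instance (lines : List String) (target_names : List String) (out : List (Int × Int)) : Decidable (Spec_find_all_sections lines target_names out) := by unfold Spec_find_all_sections; infer_instance

-- ===== CLAIM (what is proved, stated in full; the proofs are below) =====
def Claim_equal_find_all_sections : Prop := ∀ (lines : List String) (target_names : List String), Dom_find_all_sections lines target_names → Spec_find_all_sections lines target_names (find_all_sections lines target_names)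

-- ===== LEMMAS AND PROOFS =====

theorem setdefault_fold_get? (key : Int → String) (l : List Int) (d : PySem.Dict String Int) (k : String) :
    (l.foldl (fun d i => d.setdefault (key i) i) d).get? k
      = (d.get? k).or (l.find? (fun i => key i == k)) := by
  induction l generalizing d with
  | nil => simp
  | cons i t ih =>
    simp only [List.foldl_cons, ih, List.find?_cons]
    by_cases h : (key i == k) = true
    · have hk : key i = k := eq_of_beq h
      subst hk
      rw [PySem.Dict.get?_setdefault_self, h]
      cases d.get? (key i) <;> rfl
    · have hne : k ≠ key i := by intro hh; rw [hh] at h; simp at h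
      rw [PySem.Dict.get?_setdefault_of_ne _ _ hne, Bool.eq_false_iff.mpr h]

theorem filter_ge_pyRange (b j : Int) (hj : 0 ≤ j) :
    (PySem.List.pyRange 0 b 1).filter (fun h => decide (j ≤ h)) = PySem.List.pyRange j b 1 := by
  by_cases hb : j ≤ b
  · rw [PySem.List.pyRange_one_append 0 j b hj hb, List.filter_append]
    have h1 : (PySem.List.pyRange 0 j 1).filter (fun h => decide (j ≤ h)) = [] := by
      refine List.filter_eq_nil_iff.mpr (fun x hx => ?_)
      have := (PySem.List.mem_pyRange_one).mp hx
      simp only [decide_eq_true_eq]; omega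
    have h2 : (PySem.List.pyRange j b 1).filter (fun h => decide (j ≤ h)) = PySem.List.pyRange j b 1 := by
      refine List.filter_eq_self.mpr (fun x hx => ?_)
      have := (PySem.List.mem_pyRange_one).mp hx
      simp only [decide_eq_true_eq]; omega
    rw [h1, h2, List.nil_append]
  · rw [PySem.List.pyRange_one_eq_nil (show (b:Int) ≤ j by omega)]
    refine List.filter_eq_nil_iff.mpr (fun x hx => ?_)
    have := (PySem.List.mem_pyRange_one).mp hx
    simp only [decide_eq_true_eq]; omega

theorem while_end_aux (lines : List String) : ∀ (m : Nat) (j : Int),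
    ((lines.length : Int) - 1 - j).toNat = m →
    (if fss_while lines j < (lines.length : Int) - 1 then fss_while lines j else (lines.length : Int))
      = (((PySem.List.pyRange j ((lines.length : Int) - 1) 1).filter
            (fun i => is_setext_underline (PySem.List.pyGetD lines (i + 1) ""))).head?).getD (lines.length : Int) := by
  intro m
  induction m with
  | zero =>
    intro j hm
    have hj : (lines.length : Int) - 1 ≤ j := by omega
    rw [fss_while, dif_neg (by omega), if_neg (by omega),
        PySem.List.pyRange_one_eq_nil hj]
    rfl
  | succ m ih =>
    intro j hm
    have hj : j < (lines.length : Int) - 1 := by omega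
    rw [fss_while, dif_pos hj, PySem.List.pyRange_one_cons hj, List.filter_cons]
    by_cases h : is_setext_underline (PySem.List.pyGetD lines (j + 1) "") = true
    · rw [if_pos h, h]
      simp [if_pos hj]
    · rw [if_neg h, Bool.eq_false_iff.mpr h]
      simp only [Bool.false_eq_true, if_false]
      exact ih (j + 1) (by omega)

theorem find_ge_heads (lines : List String) (j : Int) (hj : 0 ≤ j) :
    ((PySem.List.pyRange 0 ((lines.length : Int) - 1) 1).filter
        (fun i => is_setext_underline (PySem.List.pyGetD lines (i + 1) ""))).find? (fun h => decide (j ≤ h))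
      = ((PySem.List.pyRange j ((lines.length : Int) - 1) 1).filter
        (fun i => is_setext_underline (PySem.List.pyGetD lines (i + 1) ""))).head? := by
  rw [← List.head?_filter]
  rw [List.filter_filter]
  refine congrArg List.head? ?_
  rw [← filter_ge_pyRange ((lines.length : Int) - 1) j hj, List.filter_filter]
  apply List.filter_congr
  intro x _
  exact Bool.and_comm _ _

def pvHeads (lines : List String) : List Int :=
  (PySem.List.pyRange 0 ((lines.length : Int) - 1) 1).filter
    (fun i => is_setext_underline (PySem.List.pyGetD lines (i + 1) ""))

def pvFirsts (lines : List String) : PySem.Dict String Int :=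
  (pvHeads lines).foldl
    (fun d i => d.setdefault (normalize_heading_name (PySem.List.pyGetD lines i "")) i) PySem.Dict.empty

theorem per_name_eq (lines : List String) (name : String) :
    find_setext_section lines name =
      ((pvFirsts lines).get? name).map
        (fun start => (start, ((pvHeads lines).find? (fun h => start + 2 ≤ h)).getD (lines.length : Int))) := by
  simp only [find_setext_section, pvFirsts, pvHeads]
  rw [setdefault_fold_get?, PySem.Dict.get?_empty, Option.none_or, ← List.head?_filter]
  rw [List.filter_filter]
  rw [PySem.List.foldl_append_if_eq_filter, List.nil_append]
  have hpred : ((PySem.List.pyRange 0 ((lines.length : Int) - 1) 1).filter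
      (fun i => normalize_heading_name (PySem.List.pyGetD lines i "") == name
        && is_setext_underline (PySem.List.pyGetD lines (i + 1) "")))
    = ((PySem.List.pyRange 0 ((lines.length : Int) - 1) 1).filter
      (fun i => (is_setext_underline (PySem.List.pyGetD lines (i + 1) "")
        && (normalize_heading_name (PySem.List.pyGetD lines i "") == name)))) := by
    apply List.filter_congr; intro x _; exact Bool.and_comm _ _
  rw [hpred]
  cases hs : ((PySem.List.pyRange 0 ((lines.length : Int) - 1) 1).filter
      (fun i => (is_setext_underline (PySem.List.pyGetD lines (i + 1) "")
        && (normalize_heading_name (PySem.List.pyGetD lines i "") == name)))) with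
  | nil => rfl
  | cons start rest =>
    simp only [List.head?_cons, Option.map_some]
    have hmem : start ∈ ((PySem.List.pyRange 0 ((lines.length : Int) - 1) 1).filter
      (fun i => (is_setext_underline (PySem.List.pyGetD lines (i + 1) "")
        && (normalize_heading_name (PySem.List.pyGetD lines i "") == name)))) := by
      rw [hs]; exact List.mem_cons_self
    have h0 : 0 ≤ start := by
      have := (PySem.List.mem_pyRange_one).mp (List.mem_of_mem_filter hmem)
      omega
    rw [find_ge_heads lines (start + 2) (by omega),
        ← while_end_aux lines ((lines.length : Int) - 1 - (start + 2)).toNat (start + 2) rfl]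

theorem spans_fold_eq (lines : List String) : ∀ (tns : List String) (acc : List (Int × Int)),
    tns.foldl (fun acc name => match find_setext_section lines name with
      | some sec => acc ++ [sec]
      | none => acc) acc
    = tns.foldl (fun acc name => match (pvFirsts lines).get? name with
      | some start => acc ++ [(start, ((pvHeads lines).find? (fun h => start + 2 ≤ h)).getD (lines.length : Int))]
      | none => acc) acc := by
  intro tns
  induction tns with
  | nil => intro _; rfl
  | cons name t ih =>
    intro acc
    simp only [List.foldl_cons]
    rw [per_name_eq lines name]
    cases h : (pvFirsts lines).get? name with
    | none => exact ih acc
    | some start => exact ih _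

theorem main_eq (lines : List String) (target_names : List String) :
    find_all_sections lines target_names = find_all_sections_alt lines target_names := by
  simp only [find_all_sections, find_all_sections_alt]
  rw [show (target_names.foldl (fun acc name => match find_setext_section lines name with
      | some sec => acc ++ [sec]
      | none => acc) []) = _ from spans_fold_eq lines target_names []]
  rfl

-- ===== VERDICT (by name: the statement is the Claim_ definition above) =====
theorem find_all_sections_spec : Claim_equal_find_all_sections := by
  intro lines target_names _
  show find_all_sections lines target_names = find_all_sections_alt lines target_names
  exact main_eq lines target_names
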